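-- pv_equiv track=rewrite | github.com/jbernal0019/pfcon | pfcon/resources.py | localize_path_args
-- ===== SOURCE A (Python) =====
-- from typing import List, Collection, Literal
--
-- def localize_path_args(args: List[str], path_flags: Collection[str],
--                        input_dir: str) -> List[str]:
--     """
--     Replace the strings following path flags with the input directory.
--
--     https://github.com/FNNDSC/CHRIS_docs/blob/7ac85e9ae1070947e6e2cda62747b427028229b0/SPEC.adoc#path-arguments
--     """
--     if len(args) == 0:
--         return args
--
--     if args[0] in path_flags:
--         return [args[0], input_dir] + localize_path_args(args[2:], path_flags,
--                                                          input_dir)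
--     return args[0:1] + localize_path_args(args[1:], path_flags, input_dir)
-- ===== SOURCE B (Python) =====
-- from typing import List, Collection
--
-- def localize_path_args(args: List[str], path_flags: Collection[str],
--                        input_dir: str) -> List[str]:
--     """Iterative single-pass version: index loop with an accumulator."""
--     flags = set(path_flags)
--     result = []
--     i = 0
--     while i < len(args):
--         if args[i] in flags:
--             result.append(args[i])
--             result.append(input_dir)
--             i += 2
--         else:
--             result.append(args[i])
--             i += 1
--     return result
-- ===== Notes on version B (the rewrite author's own statement) =====
-- stated objective: faster
-- what changed: Replaced the structural recursion with repeated list concatenation by a single-pass iterative index loop over a precomputed set of flags, appending to one result list.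
import Mathlib
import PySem

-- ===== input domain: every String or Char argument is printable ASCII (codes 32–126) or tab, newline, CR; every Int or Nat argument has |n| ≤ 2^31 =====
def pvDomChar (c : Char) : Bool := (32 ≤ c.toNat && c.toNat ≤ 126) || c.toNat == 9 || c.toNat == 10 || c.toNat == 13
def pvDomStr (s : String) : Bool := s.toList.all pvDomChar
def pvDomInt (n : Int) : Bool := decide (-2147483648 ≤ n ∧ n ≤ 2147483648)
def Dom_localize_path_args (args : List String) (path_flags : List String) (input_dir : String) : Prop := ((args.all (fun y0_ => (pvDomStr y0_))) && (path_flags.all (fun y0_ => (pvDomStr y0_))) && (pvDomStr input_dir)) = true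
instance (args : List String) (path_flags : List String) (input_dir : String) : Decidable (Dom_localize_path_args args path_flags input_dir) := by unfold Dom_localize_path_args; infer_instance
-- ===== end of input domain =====

-- B replaces A's structural recursion with repeated list concatenation by a
-- single-pass iterative index loop over a precomputed set, for asymptotic speed.

-- ===== PORT A =====
def localize_path_args (args : List String) (path_flags : List String) (input_dir : String) : List String :=
  match args with
  | [] => []                               -- len(args) == 0: return args
  | a :: rest =>
    if a ∈ path_flags then                 -- args[0] in path_flags
      a :: input_dir :: localize_path_args (rest.drop 1) path_flags input_dir   -- args[2:]
    else
      a :: localize_path_args rest path_flags input_dir                          -- args[0:1] + rec(args[1:])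
termination_by args.length
decreasing_by
  all_goals (simp; try omega)

-- ===== PORT B =====
-- while i < len(args): … (index loop with accumulator `acc` = result)
def lpaLoop (args : List String) (flags : PySem.Set String) (input_dir : String)
    (i : Nat) (acc : List String) : List String :=
  if h : i < args.length then
    if PySem.Set.contains flags args[i] then
      lpaLoop args flags input_dir (i + 2) (acc ++ [args[i], input_dir])
    else
      lpaLoop args flags input_dir (i + 1) (acc ++ [args[i]])
  else acc
termination_by args.length - i

def localize_path_args_alt (args : List String) (path_flags : List String) (input_dir : String) : List String :=
  lpaLoop args (PySem.Set.ofList path_flags) input_dir 0 []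

-- ===== PRECONDITION & SPEC =====
def Spec_localize_path_args (args : List String) (path_flags : List String) (input_dir : String) (out : List String) : Prop := out = localize_path_args_alt args path_flags input_dir
instance (args : List String) (path_flags : List String) (input_dir : String) (out : List String) : Decidable (Spec_localize_path_args args path_flags input_dir out) := by unfold Spec_localize_path_args; infer_instance

-- ===== CLAIM (what is proved, stated in full; the proofs are below) =====
def Claim_equal_localize_path_args : Prop := ∀ (args : List String) (path_flags : List String) (input_dir : String), Dom_localize_path_args args path_flags input_dir → Spec_localize_path_args args path_flags input_dir (localize_path_args args path_flags input_dir)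

-- ===== LEMMAS AND PROOFS =====

theorem lpaLoop_eq_A (args path_flags : List String) (input_dir : String) :
    ∀ i acc, lpaLoop args (PySem.Set.ofList path_flags) input_dir i acc
      = acc ++ localize_path_args (args.drop i) path_flags input_dir := by
  intro i
  induction hi : args.length - i using Nat.strong_induction_on generalizing i with
  | _ n ih =>
    intro acc
    rw [lpaLoop]
    by_cases h : i < args.length
    · have hdrop : args.drop i = args[i] :: args.drop (i + 1) :=
        List.drop_eq_getElem_cons h
      have hmem : PySem.Set.contains (PySem.Set.ofList path_flags) args[i]
          = (args[i] ∈ path_flags : Bool) := by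
        simp [PySem.Set.contains, PySem.Set.mem_ofList]
      rw [dif_pos h, hmem, hdrop, localize_path_args]
      by_cases hf : args[i] ∈ path_flags
      · rw [if_pos (by simp [hf]), if_pos hf]
        have : (args.drop (i+1)).drop 1 = args.drop (i + 2) := by
          rw [List.drop_drop]
        rw [this, ih (args.length - (i + 2)) (by omega) (i + 2) rfl]
        simp
      · rw [if_neg (by simp [hf]), if_neg hf,
            ih (args.length - (i + 1)) (by omega) (i + 1) rfl]
        simp
    · rw [dif_neg h, List.drop_of_length_le (by omega), localize_path_args]
      simp

-- ===== VERDICT (by name: the statement is the Claim_ definition above) =====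
theorem localize_path_args_spec : Claim_equal_localize_path_args := by
  intro args path_flags input_dir _
  unfold Spec_localize_path_args localize_path_args_alt
  rw [lpaLoop_eq_A]
  simp
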